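-- pv_equiv track=rewrite | github.com/plietar/librespot | common/pyspotify/util.py | bn2bin
-- ===== SOURCE A (Python) =====
-- def bn2bin(bn, length=None):
--     data = str()
--     while bn > 0:
--         data += chr(bn & 0xFF)
--         bn = bn >> 8
--     if len(data) < length:
--         data += '\0' * (length - len(data))
--     return data[::-1]
-- ===== SOURCE B (Python) =====
-- def bn2bin(bn, length=None):
--     if bn > 0:
--         h = '%x' % bn
--         if len(h) % 2:
--             h = '0' + h
--         data = ''.join(chr(int(h[i:i+2], 16)) for i in range(0, len(h), 2))
--     else:
--         data = ''
--     if len(data) < length: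
--         data = '\0' * (length - len(data)) + data
--     return data
-- ===== Notes on version B (the rewrite author's own statement) =====
-- stated objective: alternative
-- what changed: B builds the big-endian byte string directly by slicing the '%x' hex representation into two-digit pairs (prepending the padding), instead of A's per-byte shift-and-mask loop that builds a little-endian string and reverses it.
import Mathlib
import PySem

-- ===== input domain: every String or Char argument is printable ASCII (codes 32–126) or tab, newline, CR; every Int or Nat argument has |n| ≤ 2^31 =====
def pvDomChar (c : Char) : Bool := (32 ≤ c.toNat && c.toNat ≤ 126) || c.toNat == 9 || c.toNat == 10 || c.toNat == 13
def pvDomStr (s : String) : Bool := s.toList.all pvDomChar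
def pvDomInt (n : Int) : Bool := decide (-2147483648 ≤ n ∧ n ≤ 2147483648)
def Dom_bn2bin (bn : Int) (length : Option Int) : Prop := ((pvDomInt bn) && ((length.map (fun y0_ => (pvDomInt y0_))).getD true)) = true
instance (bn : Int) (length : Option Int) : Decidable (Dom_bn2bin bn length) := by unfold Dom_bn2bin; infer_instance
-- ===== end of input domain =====

-- B extracts the bytes from the '%x' hex representation (big-endian, no reversal)
-- instead of A's per-byte shift loop followed by a reversal: a different decomposition
-- of the same conversion (objective: alternative).

-- ===== PORT A =====
-- while bn > 0: data += chr(bn & 0xFF); bn = bn >> 8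
-- (bn & 0xFF = bn mod 256 and bn >> 8 = floor(bn/256) exactly, for every Python int)
def bn2binLoop (bn : Int) (data : List Char) : List Char :=
  if bn > 0 then
    bn2binLoop (PySem.Int.floordiv bn 256) (data ++ [Char.ofNat (PySem.Int.mod bn 256).toNat])
  else data
termination_by bn.toNat
decreasing_by
  have h2 : PySem.Int.floordiv bn 256 = bn / 256 := PySem.Int.floordiv_eq_ediv_of_pos (by omega)
  rw [h2]; omega

def bn2bin (bn : Int) (length : Option Int) : String :=
  let data := bn2binLoop bn []
  let data :=
    match length with
    | some l => if (data.length : Int) < l then data ++ List.replicate (l - (data.length : Int)).toNat '\x00' else data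
    | none => data   -- unreachable under Pre_bn2bin: Python raises TypeError on len(data) < None
  String.mk data.reverse      -- data[::-1]

-- ===== PORT B =====
-- '%x' % n for n > 0: lowercase hex digits, most significant first (hand-ported, exact for n > 0)
def hexStr (n : Nat) : List Char :=
  if n = 0 then [] else hexStr (n / 16) ++ [Nat.digitChar (n % 16)]

-- int(c, 16) for one lowercase hex digit char
def hexVal (c : Char) : Nat := if c.isDigit then c.toNat - 48 else c.toNat - 87

-- the join-loop: chr(int(h[i:i+2],16)) for i in range(0, len(h), 2)
def parsePairs : List Char → List Char
  | a :: b :: rest => Char.ofNat (hexVal a * 16 + hexVal b) :: parsePairs rest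
  | _ => []

def bn2bin_alt (bn : Int) (length : Option Int) : String :=
  let data :=
    if bn > 0 then
      let h := hexStr bn.toNat
      let h := if h.length % 2 = 1 then '0' :: h else h
      parsePairs h
    else []
  let data :=
    match length with
    | some l => if (data.length : Int) < l then List.replicate (l - (data.length : Int)).toNat '\x00' ++ data else data
    | none => data   -- unreachable under Pre_bn2bin: Python raises TypeError on len(data) < None
  String.mk data

-- ===== PRECONDITION & SPEC =====
-- Pre_ excludes length = None, on which A (and B) raise TypeError from 'len(data) < None'.
def Pre_bn2bin (bn : Int) (length : Option Int) : Prop := length ≠ none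
instance (bn : Int) (length : Option Int) : Decidable (Pre_bn2bin bn length) := by unfold Pre_bn2bin; infer_instance
def pvWitness_bn2bin : Int × Option Int := (74565, some 5)

def Spec_bn2bin (bn : Int) (length : Option Int) (out : String) : Prop := out = bn2bin_alt bn length
instance (bn : Int) (length : Option Int) (out : String) : Decidable (Spec_bn2bin bn length out) := by unfold Spec_bn2bin; infer_instance

-- ===== CLAIM (what is proved, stated in full; the proofs are below) =====
def Claim_equal_bn2bin : Prop := ∀ (bn : Int) (length : Option Int), Dom_bn2bin bn length → Pre_bn2bin bn length → Spec_bn2bin bn length (bn2bin bn length)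

-- ===== LEMMAS AND PROOFS =====

-- big-endian byte chars of n: the common value of both sides' core loops
def byteChars (n : Nat) : List Char :=
  if n = 0 then [] else byteChars (n / 256) ++ [Char.ofNat (n % 256)]

theorem bn2binLoop_eq (bn : Int) (data : List Char) :
    bn2binLoop bn data = data ++ (byteChars bn.toNat).reverse := by
  fun_induction bn2binLoop bn data with
  | case1 bn data h ih =>
    have hfd : PySem.Int.floordiv bn 256 = bn / 256 := PySem.Int.floordiv_eq_ediv_of_pos (by omega)
    have hmd : PySem.Int.mod bn 256 = bn % 256 := PySem.Int.mod_eq_emod_of_pos (by omega)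
    rw [ih, hfd, hmd]
    have h1 : (bn / 256).toNat = bn.toNat / 256 := by omega
    have h2 : (bn % 256).toNat = bn.toNat % 256 := by omega
    rw [h1, h2]
    have h3 : byteChars bn.toNat = byteChars (bn.toNat / 256) ++ [Char.ofNat (bn.toNat % 256)] := by
      rw [byteChars]; simp [show bn.toNat ≠ 0 by omega]
    rw [h3]; simp
  | case2 bn data h =>
    have : bn.toNat = 0 := by omega
    rw [this, byteChars]; simp

theorem hexVal_digitChar : ∀ m < 16, hexVal (Nat.digitChar m) = m := by decide

theorem parsePairs_append_even : ∀ (xs ys : List Char), xs.length % 2 = 0 →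
    parsePairs (xs ++ ys) = parsePairs xs ++ parsePairs ys
  | [], ys, _ => by simp [parsePairs]
  | [a], ys, h => by simp at h
  | a :: b :: t, ys, h => by
    simp only [List.cons_append, parsePairs, List.length_cons] at *
    rw [parsePairs_append_even t ys (by omega)]

def pad2 (l : List Char) : List Char := if l.length % 2 = 1 then '0' :: l else l

theorem pad2_length_even (l : List Char) : (pad2 l).length % 2 = 0 ∨ l.length = 0 := by
  unfold pad2; split_ifs with h
  · left; simp; omega
  · omega

theorem hexStr_ne_nil (n : Nat) (hn : 0 < n) : hexStr n ≠ [] := by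
  rw [hexStr]; simp [show n ≠ 0 by omega]

theorem pad2_append_two (l : List Char) (a b : Char) :
    pad2 (l ++ [a, b]) = pad2 l ++ [a, b] := by
  unfold pad2; simp; split_ifs <;> simp_all

theorem parsePairs_pad2_hexStr : ∀ n, 0 < n → parsePairs (pad2 (hexStr n)) = byteChars n := by
  intro n
  induction n using Nat.strong_induction_on with
  | _ n ih =>
    intro hn
    by_cases hs : n < 256
    · -- one byte: pad2 (hexStr n) = [digitChar (n/16), digitChar (n%16)]
      have hpair : pad2 (hexStr n) = [Nat.digitChar (n / 16), Nat.digitChar (n % 16)] := by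
        by_cases h16 : n < 16
        · rw [hexStr]
          simp [show n ≠ 0 by omega, show n / 16 = 0 by omega, hexStr, pad2,
            show Nat.digitChar 0 = '0' from rfl]
        · rw [hexStr]
          simp only [show n ≠ 0 by omega, if_false]
          rw [hexStr]
          simp [show n / 16 ≠ 0 by omega, show n / 16 / 16 = 0 by omega, hexStr, pad2,
            Nat.mod_eq_of_lt (show n / 16 < 16 by omega)]
      rw [hpair]
      have h1 := hexVal_digitChar (n / 16) (by omega)
      have h2 := hexVal_digitChar (n % 16) (by omega)
      simp [parsePairs, h1, h2, byteChars, show n ≠ 0 by omega,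
        show n / 256 = 0 by omega, show n % 256 = n by omega, show n / 16 * 16 + n % 16 = n by omega]
    · -- n ≥ 256: peel the last two hex digits
      have hsplit : hexStr n = hexStr (n / 256) ++ [Nat.digitChar (n % 256 / 16), Nat.digitChar (n % 16)] := by
        rw [hexStr]
        simp only [show n ≠ 0 by omega, if_false]
        rw [hexStr]
        simp only [show n / 16 ≠ 0 by omega, if_false]
        have : n / 16 / 16 = n / 256 := by omega
        have h2 : n / 16 % 16 = n % 256 / 16 := by omega
        rw [this, h2]; simp
      rw [hsplit, pad2_append_two]
      have heven : (pad2 (hexStr (n / 256))).length % 2 = 0 := by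
        rcases pad2_length_even (hexStr (n / 256)) with h | h
        · exact h
        · exact absurd (List.length_eq_zero_iff.mp h) (hexStr_ne_nil _ (by omega))
      rw [parsePairs_append_even _ _ heven, ih (n / 256) (by omega) (by omega)]
      have h1 := hexVal_digitChar (n % 256 / 16) (by omega)
      have h2 := hexVal_digitChar (n % 16) (by omega)
      have hb : byteChars n = byteChars (n / 256) ++ [Char.ofNat (n % 256)] := by
        rw [byteChars]; simp [show n ≠ 0 by omega]
      rw [hb]
      simp [parsePairs, h1, h2, show n % 256 / 16 * 16 + n % 16 = n % 256 by omega]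

theorem core_eq (bn : Int) :
    (bn2binLoop bn []).reverse =
      (if bn > 0 then parsePairs (pad2 (hexStr bn.toNat)) else []) := by
  rw [bn2binLoop_eq]
  split_ifs with h
  · rw [parsePairs_pad2_hexStr bn.toNat (by omega)]; simp
  · have : bn.toNat = 0 := by omega
    rw [this, byteChars]; simp

-- ===== VERDICT (by name: the statement is the Claim_ definition above) =====
theorem bn2bin_spec : Claim_equal_bn2bin := by
  intro bn length _ hpre
  unfold Spec_bn2bin bn2bin bn2bin_alt
  match length with
  | none => exact absurd rfl hpre
  | some l =>
    have hc := core_eq bn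
    unfold pad2 at hc
    simp only [← hc, List.length_reverse]
    by_cases hpad : ((bn2binLoop bn []).length : Int) < l
    · simp [hpad, List.reverse_append, List.reverse_replicate]
    · simp [hpad]
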